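-- pv_equiv track=rewrite | github.com/silivanxay/Markov_clustering | src/Utility.py | getBottomN
-- ===== SOURCE A (Python) =====
-- import operator
--
-- def getBottomN(H, n, rev):
--     # written by Phetsouvanh Silivanxay
--     H_dict = dict()
--     for i in range(len(H)):
--         H_dict[i] = H[i]
--     count = 0
--     output = []
--     for key, value in sorted(H_dict.items(), key=operator.itemgetter(1), reverse=rev):
--         if (count == n):
--             break
--         output.append(key)
--         count = count + 1
--
--     return output
-- ===== SOURCE B (Python) =====
-- def getBottomN(H, n, rev):
--     # repeated linear selection instead of dict + full stable sort
--     remaining = list(enumerate(H))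
--     count = 0
--     output = []
--     while count != n and remaining:
--         best = remaining[0]
--         for p in remaining[1:]:
--             if (p[1] > best[1]) if rev else (p[1] < best[1]):
--                 best = p
--         output.append(best[0])
--         remaining.remove(best)
--         count += 1
--     return output
-- ===== Notes on version B (the rewrite author's own statement) =====
-- stated objective: alternative
-- what changed: Replaces the index dict plus full stable sort with break-counting by repeated linear selection: each round scans the remaining (index,value) pairs, takes the first strictly-extreme one (so ties go to the lowest index, like the stable sort), removes it, and stops when count reaches n or the pairs run out.
import Mathlib
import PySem

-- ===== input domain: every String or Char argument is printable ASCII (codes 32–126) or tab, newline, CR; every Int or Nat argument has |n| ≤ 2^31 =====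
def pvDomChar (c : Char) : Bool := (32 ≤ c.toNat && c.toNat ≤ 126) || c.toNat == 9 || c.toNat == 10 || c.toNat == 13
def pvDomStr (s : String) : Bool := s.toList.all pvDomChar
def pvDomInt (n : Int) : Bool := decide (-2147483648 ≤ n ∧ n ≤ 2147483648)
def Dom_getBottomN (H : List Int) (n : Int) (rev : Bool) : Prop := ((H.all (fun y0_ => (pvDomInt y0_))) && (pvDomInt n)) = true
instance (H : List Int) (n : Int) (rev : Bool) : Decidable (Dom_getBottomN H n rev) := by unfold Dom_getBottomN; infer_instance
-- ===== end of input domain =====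

-- B replaces A's index-dict plus full stable sort and break-loop by repeated linear selection
-- of the first strictly-extreme remaining (index,value) pair (alternative algorithm; return value only).


-- ===== PORT A =====
-- the loop body of A's 'for key, value in sorted(...)' with state (count, output, broken)
def pvStepA (n : Int) (st : Int × List Int × Bool) (p : Int × Int) : Int × List Int × Bool :=
  if st.2.2 then st
  else if st.1 = n then (st.1, st.2.1, true)
  else (st.1 + 1, st.2.1 ++ [p.1], false)

def getBottomN (H : List Int) (n : Int) (rev : Bool) : List Int :=
  let hdict := (PySem.List.pyRange 0 (H.length : Int) 1).foldl
      (fun d i => PySem.Dict.insert d i (PySem.List.pyGetD H i 0)) (PySem.Dict.empty : PySem.Dict Int Int)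
  let srt := PySem.List.sorted hdict.items (fun p => p.2) rev
  (srt.foldl (pvStepA n) (0, ([] : List Int), false)).2.1

-- ===== PORT B =====
-- '(p[1] > best[1]) if rev else (p[1] < best[1])' — is p strictly better than b
def pvB (rev : Bool) (p b : Int × Int) : Bool :=
  if rev then decide (b.2 < p.2) else decide (p.2 < b.2)

-- the inner 'for p in remaining[1:]' selection scan
def pvPick (bf : Int × Int → Int × Int → Bool) (best : Int × Int) (rest : List (Int × Int)) : Int × Int :=
  rest.foldl (fun b p => if bf p b then p else b) best

-- needed by pvLoop's termination proof
theorem pvPick_mem (bf : Int × Int → Int × Int → Bool) (best : Int × Int) (rest : List (Int × Int)) :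
    pvPick bf best rest = best ∨ pvPick bf best rest ∈ rest := by
  induction rest generalizing best with
  | nil => exact Or.inl rfl
  | cons p t ih =>
    simp only [pvPick, List.foldl_cons] at *
    by_cases h : bf p best = true <;> simp [h] <;>
      rcases ih (if bf p best then p else best) with h' | h' <;> simp [h] at h' <;> simp [h']

-- the 'while count != n and remaining' loop
def pvLoop (rev : Bool) (n : Int) (count : Int) (remaining : List (Int × Int)) (output : List Int) : List Int :=
  if count = n then output
  else
    match remaining with
    | [] => output
    | b :: rest =>
        pvLoop rev n (count + 1) ((b :: rest).erase (pvPick (pvB rev) b rest))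
          (output ++ [(pvPick (pvB rev) b rest).1])
termination_by remaining.length
decreasing_by
  have hm : pvPick (pvB rev) b rest ∈ b :: rest := by
    rcases pvPick_mem (pvB rev) b rest with h | h
    · simp [h]
    · simp [h]
  have := List.length_erase_of_mem hm
  simp at this ⊢
  omega

def getBottomN_alt (H : List Int) (n : Int) (rev : Bool) : List Int :=
  pvLoop rev n 0 (PySem.List.enumerate H 0) []

-- ===== PRECONDITION & SPEC =====
def Spec_getBottomN (H : List Int) (n : Int) (rev : Bool) (out : List Int) : Prop := out = getBottomN_alt H n rev
instance (H : List Int) (n : Int) (rev : Bool) (out : List Int) : Decidable (Spec_getBottomN H n rev out) := by unfold Spec_getBottomN; infer_instance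

-- ===== CLAIM (what is proved, stated in full; the proofs are below) =====
def Claim_equal_getBottomN : Prop := ∀ (H : List Int) (n : Int) (rev : Bool), Dom_getBottomN H n rev → Spec_getBottomN H n rev (getBottomN H n rev)

-- ===== LEMMAS AND PROOFS =====

-- stable insertion sort as A's sorted computes it (cited below via sorted_eq_foldl_insertBy)
def pvSortedBy (bf : Int × Int → Int × Int → Bool) (l : List (Int × Int)) : List (Int × Int) :=
  l.foldl (fun acc x => PySem.List.insertBy bf x acc) []

-- A's break-loop output on a list of pairs
def pvTake (n : Int) (c : Int) (l : List (Int × Int)) : List Int :=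
  match l with
  | [] => []
  | p :: t => if c = n then [] else p.1 :: pvTake n (c + 1) t

theorem pvTake_self (n : Int) (l : List (Int × Int)) : pvTake n n l = [] := by
  cases l <;> simp [pvTake]

theorem foldA_broken (n : Int) (l : List (Int × Int)) (c : Int) (o : List Int) :
    l.foldl (pvStepA n) (c, o, true) = (c, o, true) := by
  induction l with
  | nil => rfl
  | cons p t ih => simp [pvStepA]; exact ih

theorem foldA (n : Int) (l : List (Int × Int)) (c : Int) (o : List Int) :
    (l.foldl (pvStepA n) (c, o, false)).2.1 = o ++ pvTake n c l := by
  induction l generalizing c o with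
  | nil => simp [pvTake]
  | cons p t ih =>
    by_cases h : c = n
    · simp [pvStepA, h, pvTake, foldA_broken]
    · simp [pvStepA, h, pvTake, ih (c + 1) (o ++ [p.1])]

-- properties of the strict comparison pvB
theorem pvB_irr (rev : Bool) (a : Int × Int) : pvB rev a a = false := by
  cases rev <;> simp [pvB]

theorem pvB_tr2 (rev : Bool) (a b c : Int × Int) (h1 : pvB rev a b = true) (h2 : pvB rev a c = false) :
    pvB rev b c = false := by
  cases rev <;> simp [pvB] at * <;> omega

theorem pvB_tr3 (rev : Bool) (a b c : Int × Int) (h1 : pvB rev a b = false) (h2 : pvB rev b c = false) :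
    pvB rev a c = false := by
  cases rev <;> simp [pvB] at * <;> omega

-- the selected pair is weakly extreme among the scanned ones (first-seen wins on ties)
theorem pvPick_cons (bf : Int × Int → Int × Int → Bool) (init p : Int × Int) (t : List (Int × Int)) :
    pvPick bf init (p :: t) = pvPick bf (if bf p init then p else init) t := rfl

theorem pvPick_min (rev : Bool) : ∀ (rest : List (Int × Int)) (init y : Int × Int),
    (y = init ∨ y ∈ rest) → pvB rev y (pvPick (pvB rev) init rest) = false := by
  intro rest
  induction rest with
  | nil =>
    rintro init y (rfl | h)
    · exact pvB_irr rev y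
    · simp at h
  | cons p t ih =>
    rintro init y hy
    rw [pvPick_cons]
    by_cases hp : pvB rev p init = true
    · rw [if_pos hp]
      rcases hy with heq | hm
      · rw [heq]; exact pvB_tr2 rev p init _ hp (ih p p (Or.inl rfl))
      · rcases List.mem_cons.mp hm with heq | hm
        · rw [heq]; exact ih p p (Or.inl rfl)
        · exact ih p y (Or.inr hm)
    · rw [if_neg hp]
      have hp' : pvB rev p init = false := by simpa using hp
      rcases hy with heq | hm
      · rw [heq]; exact ih init init (Or.inl rfl)
      · rcases List.mem_cons.mp hm with heq | hm
        · rw [heq]; exact pvB_tr3 rev p init _ hp' (ih init init (Or.inl rfl))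
        · exact ih init y (Or.inr hm)

theorem insertBy_cons_pos (bf : Int × Int → Int × Int → Bool) (x y : Int × Int)
    (ys : List (Int × Int)) (h : bf x y = true) :
    PySem.List.insertBy bf x (y :: ys) = x :: y :: ys := by
  simp [PySem.List.insertBy, h]

theorem insertBy_cons_neg (bf : Int × Int → Int × Int → Bool) (x y : Int × Int)
    (ys : List (Int × Int)) (h : bf x y = false) :
    PySem.List.insertBy bf x (y :: ys) = y :: PySem.List.insertBy bf x ys := by
  simp [PySem.List.insertBy, h]

theorem pvSortedBy_append (bf : Int × Int → Int × Int → Bool) (l : List (Int × Int)) (x : Int × Int) :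
    pvSortedBy bf (l ++ [x]) = PySem.List.insertBy bf x (pvSortedBy bf l) := by
  simp [pvSortedBy, List.foldl_append]

-- selection step = head of the stable insertion sort
theorem pvSortStep (rev : Bool) (b : Int × Int) (rest : List (Int × Int)) :
    pvSortedBy (pvB rev) (b :: rest) =
      pvPick (pvB rev) b rest ::
        pvSortedBy (pvB rev) ((b :: rest).erase (pvPick (pvB rev) b rest)) := by
  induction rest using List.reverseRecOn with
  | nil => simp [pvSortedBy, pvPick, PySem.List.insertBy]
  | append_singleton r x ih =>
    have hcons : b :: (r ++ [x]) = (b :: r) ++ [x] := by simp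
    set m := pvPick (pvB rev) b r with hm
    have hpick : pvPick (pvB rev) b (r ++ [x]) = if pvB rev x m then x else m := by
      simp [pvPick, List.foldl_append, hm]
    rw [hcons, pvSortedBy_append, ih, hpick]
    by_cases hbx : pvB rev x m = true
    · -- x strictly better than the previous best: new best is x, and x is fresh
      have hxnot : x ∉ b :: r := by
        intro hx
        have := pvPick_min rev r b x (by simpa using (List.mem_cons.mp hx))
        rw [← hm] at this
        simp [this] at hbx
      have herase : ((b :: r) ++ [x]).erase x = b :: r := by
        rw [List.erase_append_right _ hxnot]
        simp
      rw [if_pos hbx, herase, ih, insertBy_cons_pos _ _ _ _ hbx]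
    · -- previous best survives; x goes into the recursive sort
      have hbx' : pvB rev x m = false := by simpa using hbx
      have hmmem : m ∈ b :: r := by
        rcases pvPick_mem (pvB rev) b r with h | h
        · rw [← hm] at h; simp [h]
        · rw [← hm] at h; simp [h]
      have herase : ((b :: r) ++ [x]).erase m = ((b :: r).erase m) ++ [x] :=
        List.erase_append_left _ hmmem
      rw [if_neg (by simp [hbx']), herase, pvSortedBy_append,
          insertBy_cons_neg _ _ _ _ hbx']

-- B's while-loop computes A's break-loop over the stable sort
theorem pvLoop_eq (rev : Bool) (n : Int) : ∀ (k : Nat) (ps : List (Int × Int)), ps.length = k →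
    ∀ (c : Int) (out : List Int), pvLoop rev n c ps out = out ++ pvTake n c (pvSortedBy (pvB rev) ps) := by
  intro k
  induction k using Nat.strong_induction_on with
  | _ k ih =>
    intro ps hlen c out
    by_cases hc : c = n
    · subst hc
      rw [pvLoop.eq_def]
      simp [pvTake_self]
    · cases ps with
      | nil =>
        rw [pvLoop.eq_def]
        simp [hc, pvSortedBy, pvTake]
      | cons b rest =>
        have hmmem : pvPick (pvB rev) b rest ∈ b :: rest := by
          rcases pvPick_mem (pvB rev) b rest with h | h
          · simp [h]
          · simp [h]
        have hlt : ((b :: rest).erase (pvPick (pvB rev) b rest)).length < k := by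
          have := List.length_erase_of_mem hmmem
          simp at this hlen
          omega
        have hstep : pvLoop rev n c (b :: rest) out
            = pvLoop rev n (c + 1) ((b :: rest).erase (pvPick (pvB rev) b rest))
                (out ++ [(pvPick (pvB rev) b rest).1]) := by
          rw [pvLoop.eq_def]
          simp [hc]
        rw [hstep, ih _ hlt _ rfl (c + 1) (out ++ [(pvPick (pvB rev) b rest).1]),
            pvSortStep rev b rest]
        simp [pvTake, hc]

-- PySem's sorted with key = value is pvSortedBy (pvB rev)
theorem sorted_eq_pvSortedBy (rev : Bool) (l : List (Int × Int)) :
    PySem.List.sorted l (fun p => p.2) rev = pvSortedBy (pvB rev) l := by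
  cases rev
  · rw [PySem.List.sorted_eq_foldl_insertBy]; rfl
  · rw [PySem.List.sorted_rev_eq_foldl_insertBy]; rfl

-- the dict A builds over range(len(H)) has items = enumerate(H)
theorem dict_build (H : List Int) : ∀ (k : Nat) (a : Int) (d : PySem.Dict Int Int),
    ((H.length : Int) - a).toNat = k → (∀ j : Int, a ≤ j → d.contains j = false) →
    ((PySem.List.pyRange a (H.length : Int) 1).foldl
        (fun d i => PySem.Dict.insert d i (PySem.List.pyGetD H i 0)) d).items
      = d.items ++ (PySem.List.pyRange a (H.length : Int) 1).map (fun i => (i, PySem.List.pyGetD H i 0)) := by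
  intro k
  induction k with
  | zero =>
    intro a d hk _
    rw [PySem.List.pyRange_one_eq_nil (by omega)]
    simp
  | succ k ih =>
    intro a d hk hfresh
    have hab : a < (H.length : Int) := by omega
    rw [PySem.List.pyRange_one_cons hab]
    simp only [List.foldl_cons, List.map_cons]
    have hfresh' : ∀ j : Int, a + 1 ≤ j →
        (PySem.Dict.insert d a (PySem.List.pyGetD H a 0)).contains j = false := by
      intro j hj
      rw [PySem.Dict.contains_insert]
      have : (j == a) = false := by simp; omega
      simp [this, hfresh j (by omega)]
    rw [ih (a + 1) _ (by omega) hfresh',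
        PySem.Dict.items_insert_of_not_contains d (PySem.List.pyGetD H a 0) (hfresh a le_rfl)]
    simp

theorem enumerate_eq_range_map (H : List Int) : ∀ (s : Int),
    PySem.List.enumerate H s = (List.range H.length).map (fun k : Nat => ((s + k : Int), H.getD k 0)) := by
  induction H with
  | nil => intro s; simp [PySem.List.enumerate_nil]
  | cons x t ih =>
    intro s
    rw [PySem.List.enumerate_cons, ih (s + 1)]
    simp only [List.length_cons, List.range_succ_eq_map, List.map_cons, List.map_map]
    congr 1
    · simp
    · apply List.map_congr_left
      intro k _
      simp only [Function.comp, List.getD_cons_succ, Prod.mk.injEq]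
      exact ⟨by push_cast; ring, trivial⟩

theorem range_map_eq_enumerate (H : List Int) :
    (PySem.List.pyRange 0 (H.length : Int) 1).map (fun i => (i, PySem.List.pyGetD H i 0))
      = PySem.List.enumerate H 0 := by
  rw [PySem.List.pyRange_one, enumerate_eq_range_map H 0]
  simp only [List.map_map]
  apply List.map_congr_left
  intro k _
  simp

-- ===== VERDICT (by name: the statement is the Claim_ definition above) =====
theorem getBottomN_spec : Claim_equal_getBottomN := by
  unfold Claim_equal_getBottomN
  intro H n rev _
  unfold Spec_getBottomN getBottomN getBottomN_alt
  simp only []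
  rw [dict_build H ((H.length : Int) - 0).toNat 0 PySem.Dict.empty rfl
        (by intro j _; exact PySem.Dict.contains_empty j)]
  rw [pvLoop_eq rev n (PySem.List.enumerate H 0).length _ rfl 0 []]
  rw [sorted_eq_pvSortedBy]
  have hemp : (PySem.Dict.empty : PySem.Dict Int Int).items = ([] : List (Int × Int)) := rfl
  simp [range_map_eq_enumerate H, foldA, hemp]
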